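-- pv_equiv track=rewrite | github.com/jacobijy/leetcode | 29.divide-two-integers.py | calcMaxBi
-- ===== SOURCE A (Python) =====
-- def calcMaxBi(input: int, divisor: int) -> int:
--     tmp = divisor
--     result = 0
--     count = 0
--     while tmp <= input:
--         tmp = tmp << 1
--         count = count + 1
--     return count - 1
-- ===== SOURCE B (Python) =====
-- def calcMaxBi(input: int, divisor: int) -> int:
--     if divisor > input:
--         return -1
--     k = input.bit_length() - divisor.bit_length()
--     if (divisor << k) > input:
--         k -= 1
--     return k
-- ===== Notes on version B (the rewrite author's own statement) =====
-- stated objective: faster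
-- what changed: Replaced the doubling loop with a closed form: k = input.bit_length() - divisor.bit_length(), corrected down by one if divisor<<k exceeds input.
import Mathlib
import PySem

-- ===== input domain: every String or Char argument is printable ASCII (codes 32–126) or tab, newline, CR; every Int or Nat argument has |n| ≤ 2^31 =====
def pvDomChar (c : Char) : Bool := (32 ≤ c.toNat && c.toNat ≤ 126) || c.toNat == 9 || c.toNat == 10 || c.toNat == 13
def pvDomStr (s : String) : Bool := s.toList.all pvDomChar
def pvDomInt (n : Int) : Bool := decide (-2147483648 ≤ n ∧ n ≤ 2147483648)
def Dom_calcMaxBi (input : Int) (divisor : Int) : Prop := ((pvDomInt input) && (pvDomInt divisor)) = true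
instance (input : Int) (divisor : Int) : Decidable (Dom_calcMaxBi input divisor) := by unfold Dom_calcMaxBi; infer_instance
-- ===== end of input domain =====

-- B replaces A's doubling loop with a closed form from bit lengths (O(1) instead of a loop);
-- Pre_ excludes exactly the inputs (divisor ≤ 0 and divisor ≤ input) on which A's while loop never terminates.


-- ===== PORT A =====
-- A's while loop, fueled (fuel only makes the recursion total; 64 steps suffice for every
-- terminating run inside Dom: divisor ≥ 1 doubles past input ≤ 2^31 within 33 iterations).
def pvLoopA (input : Int) : Nat → Int → Int → Int
  | 0, _tmp, count => count - 1
  | fuel + 1, tmp, count =>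
      if tmp ≤ input then pvLoopA input fuel (tmp * 2) (count + 1) else count - 1

def calcMaxBi (input : Int) (divisor : Int) : Int :=
  pvLoopA input 64 divisor 0

-- ===== PORT B =====
-- int.bit_length() on the nonnegative values admitted by Pre_ is Nat.size of the value;
-- divisor << k is divisor * 2^k (k ≥ 0 under Pre_, where input ≥ divisor > 0).
def calcMaxBi_alt (input : Int) (divisor : Int) : Int :=
  if divisor > input then -1
  else
    let k : Int := (Int.ofNat input.toNat.size) - (Int.ofNat divisor.toNat.size)
    if divisor * 2 ^ k.toNat > input then k - 1 else k

-- ===== PRECONDITION & SPEC =====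
-- Pre_ excludes exactly the inputs on which A never returns: when divisor ≤ 0 and divisor ≤ input,
-- tmp never grows past input and A's while loop runs forever.
def Pre_calcMaxBi (input : Int) (divisor : Int) : Prop := 0 < divisor ∨ input < divisor
instance (input : Int) (divisor : Int) : Decidable (Pre_calcMaxBi input divisor) := by
  unfold Pre_calcMaxBi; infer_instance

def pvWitness_calcMaxBi : Int × Int := (10, 3)

def Spec_calcMaxBi (input : Int) (divisor : Int) (out : Int) : Prop := out = calcMaxBi_alt input divisor
instance (input : Int) (divisor : Int) (out : Int) : Decidable (Spec_calcMaxBi input divisor out) := by unfold Spec_calcMaxBi; infer_instance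

-- ===== CLAIM (what is proved, stated in full; the proofs are below) =====
def Claim_equal_calcMaxBi : Prop := ∀ (input : Int) (divisor : Int), Dom_calcMaxBi input divisor → Pre_calcMaxBi input divisor → Spec_calcMaxBi input divisor (calcMaxBi input divisor)

-- ===== LEMMAS AND PROOFS =====

-- If tmp·2^j ≤ input < tmp·2^(j+1) with 0 < tmp and enough fuel, the loop does j+1 iterations.
lemma pvLoopA_eq (input : Int) :
    ∀ (j fuel : Nat) (tmp count : Int), 0 < tmp → j < fuel →
      tmp * 2 ^ j ≤ input → input < tmp * 2 ^ (j + 1) →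
      pvLoopA input fuel tmp count = count + j := by
  intro j
  induction j with
  | zero =>
      intro fuel tmp count htmp hf hle hlt
      obtain ⟨f, rfl⟩ : ∃ f, fuel = f + 1 := ⟨fuel - 1, by omega⟩
      have hle' : tmp ≤ input := by simpa using hle
      have hlt' : input < tmp * 2 := by simpa using hlt
      match f with
      | 0 =>
          simp only [pvLoopA, if_pos hle']
          omega
      | f' + 1 =>
          simp only [pvLoopA, if_pos hle', if_neg (by omega : ¬ tmp * 2 ≤ input)]
          omega
  | succ j ih =>
      intro fuel tmp count htmp hf hle hlt
      obtain ⟨f, rfl⟩ : ∃ f, fuel = f + 1 := ⟨fuel - 1, by omega⟩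
      have h2 : (1 : Int) ≤ 2 ^ (j + 1) := one_le_pow₀ (by norm_num)
      have hcond : tmp ≤ input := le_trans (le_mul_of_one_le_right htmp.le h2) hle
      simp only [pvLoopA, if_pos hcond]
      have hle' : (tmp * 2) * 2 ^ j ≤ input := by
        have : tmp * 2 * 2 ^ j = tmp * 2 ^ (j + 1) := by ring
        omega
      have hlt' : input < (tmp * 2) * 2 ^ (j + 1) := by
        have : tmp * 2 * 2 ^ (j + 1) = tmp * 2 ^ (j + 1 + 1) := by ring
        omega
      have := ih f (tmp * 2) (count + 1) (by omega) (by omega) hle' hlt'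
      rw [this]; push_cast; ring

-- For 0 < n, 2^(size n − 1) ≤ n < 2^(size n).
lemma size_bounds (n : Nat) (hn : 0 < n) : 2 ^ (n.size - 1) ≤ n ∧ n < 2 ^ n.size := by
  constructor
  · have hs : 0 < n.size := Nat.size_pos.mpr hn
    exact (Nat.lt_size.mp (by omega))
  · exact Nat.lt_size_self n

-- ===== VERDICT (by name: the statement is the Claim_ definition above) =====
theorem calcMaxBi_spec : Claim_equal_calcMaxBi := by
  intro input divisor hdom hpre
  unfold Spec_calcMaxBi calcMaxBi calcMaxBi_alt
  by_cases hgt : divisor > input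
  · -- loop body never runs; both sides return -1
    have : ¬ (divisor ≤ input) := by omega
    simp [pvLoopA, this, hgt]
  · -- divisor ≤ input, and (from Pre_) 0 < divisor
    have hdle : divisor ≤ input := by omega
    have hdpos : 0 < divisor := by
      rcases hpre with h | h
      · exact h
      · omega
    have hipos : 0 < input := lt_of_lt_of_le hdpos hdle
    set a := input.toNat with ha
    set d := divisor.toNat with hd
    have hia : input = (a : Int) := by omega
    have hid : divisor = (d : Int) := by omega
    have hapos : 0 < a := by omega
    have hdpos' : 0 < d := by omega
    have hdlea : d ≤ a := by omega
    obtain ⟨hd1, hd2⟩ := size_bounds d hdpos'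
    obtain ⟨ha1, ha2⟩ := size_bounds a hapos
    have hsz : d.size ≤ a.size := Nat.size_le_size hdlea
    set j : Nat := a.size - d.size with hj
    have hk : (Int.ofNat a.size) - (Int.ofNat d.size) = (j : Int) := by
      simp only [Int.ofNat_eq_natCast]; omega
    have hkt : ((Int.ofNat a.size - Int.ofNat d.size)).toNat = j := by omega
    -- input bound from Dom: j ≤ 31 < 64
    have hbound : input ≤ 2147483648 := by
      simp only [Dom_calcMaxBi, pvDomInt, Bool.and_eq_true, decide_eq_true_eq] at hdom
      exact hdom.1.2
    have hszd : 0 < d.size := Nat.size_pos.mpr hdpos'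
    have hsza : 0 < a.size := Nat.size_pos.mpr hapos
    have hasize : a.size ≤ 32 := by
      have : a < 2 ^ 32 := by omega
      exact Nat.size_le.mpr this
    have hjlt : j < 64 := by omega
    simp only [if_neg hgt, hk, Int.toNat_natCast]
    by_cases hadj : divisor * 2 ^ j > input
    · -- B adjusts down: result j - 1
      have hadjN : a < d * 2 ^ j := by
        rw [hia, hid] at hadj; exact_mod_cast hadj
      have hj1 : 1 ≤ j := by
        by_contra h
        have hj0 : j = 0 := by omega
        rw [hj0] at hadjN
        simp at hadjN
        omega
      -- d * 2^(j-1) ≤ a: d < 2^(size d), so d·2^(j−1) < 2^(size d + j − 1) = 2^(size a − 1) ≤ a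
      have hlow : d * 2 ^ (j - 1) ≤ a := by
        have h1 : d * 2 ^ (j - 1) < 2 ^ d.size * 2 ^ (j - 1) :=
          (Nat.mul_lt_mul_right (Nat.two_pow_pos _)).mpr hd2
        have h2 : 2 ^ d.size * 2 ^ (j - 1) = 2 ^ (a.size - 1) := by
          rw [← pow_add]; congr 1; omega
        omega
      have hup : a < d * 2 ^ ((j - 1) + 1) := by
        have h : (j - 1) + 1 = j := by omega
        rw [h]; exact hadjN
      have hloop := pvLoopA_eq input (j - 1) 64 divisor 0 hdpos (by omega)
        (by rw [hia, hid]; exact_mod_cast hlow) (by rw [hia, hid]; exact_mod_cast hup)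
      rw [if_pos hadj, hloop]
      omega
    · -- no adjustment: result j
      push Not at hadj
      have hleN : d * 2 ^ j ≤ a := by rw [hia, hid] at hadj; exact_mod_cast hadj
      -- a < d·2^(j+1): 2^(size d − 1) ≤ d, so d·2^(j+1) ≥ 2^(size a) > a
      have hup : a < d * 2 ^ (j + 1) := by
        have h1 : 2 ^ (d.size - 1) * 2 ^ (j + 1) ≤ d * 2 ^ (j + 1) :=
          Nat.mul_le_mul_right _ hd1
        have h2 : 2 ^ (d.size - 1) * 2 ^ (j + 1) = 2 ^ a.size := by
          rw [← pow_add]; congr 1; omega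
        omega
      have hloop := pvLoopA_eq input j 64 divisor 0 hdpos hjlt
        (by rw [hia, hid]; exact_mod_cast hleN) (by rw [hia, hid]; exact_mod_cast hup)
      rw [if_neg (by omega), hloop]
      omega
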